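-- pv_equiv track=rewrite | github.com/Lezh1n1208/MyHomeWork | Python_PtitCode/PY01003.py | solve
-- ===== SOURCE A (Python) =====
-- def solve(a):
--     b = str(a)
--     i = len(b) - 1
--     res = ""
--     k = 0
--     while i >= 1:
--         if int(b[i]) + k >= 5:
--             k = 1
--         else:
--             k = 0
--         res += "0"
--         i -= 1
--     res = str(int(b[i]) + k) + res;
--     return res
-- ===== SOURCE B (Python) =====
-- def solve(a):
--     b = str(a)
--     digits = [int(c) for c in b]
--     carry = 0
--     for d in digits[1:]:
--         if d != 4:
--             carry = 1 if d >= 5 else 0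
--             break
--     return str(digits[0] + carry) + "0" * (len(b) - 1)
-- ===== Notes on version B (the rewrite author's own statement) =====
-- stated objective: alternative
-- what changed: Replaces A's right-to-left whole-string carry-propagation loop with a left-to-right early-exit scan: the carry is decided by the first digit after the leading one that is not 4, and the zeros are emitted in one multiplication instead of one append per iteration.
import Mathlib
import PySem

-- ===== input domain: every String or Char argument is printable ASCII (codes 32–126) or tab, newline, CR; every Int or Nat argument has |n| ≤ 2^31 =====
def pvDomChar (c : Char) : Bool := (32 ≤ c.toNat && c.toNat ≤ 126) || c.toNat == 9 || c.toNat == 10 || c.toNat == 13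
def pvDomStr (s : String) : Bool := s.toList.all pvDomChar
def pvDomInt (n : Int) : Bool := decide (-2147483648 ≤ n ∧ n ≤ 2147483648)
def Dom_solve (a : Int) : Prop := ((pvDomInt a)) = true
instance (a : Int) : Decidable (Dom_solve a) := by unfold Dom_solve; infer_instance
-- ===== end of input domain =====

-- B replaces A's right-to-left carry-propagation loop by a left-to-right early-exit scan
-- for the first post-leading digit ≠ 4 (objective: alternative algorithm, similar cost).
-- Pre_ excludes negative a, on which the Python A raises ValueError (int('-')).

-- ===== PORT A =====
-- int(b[i]) on a one-character string; exact on digit chars (Pre_ excludes the '-' case where Python raises)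
def pyDigit (c : Char) : Int := (PySem.Int.ofStr? (String.ofList [c])).getD 0

def solveLoop (bs : List Char) (i : Nat) (k : Int) (res : String) : String × Int :=
  if i ≥ 1 then
    solveLoop bs (i - 1) (if pyDigit (bs.getD i ' ') + k ≥ 5 then 1 else 0) (res ++ "0")
  else (res, k)
termination_by i

def solve (a : Int) : String :=
  let bs := (PySem.Int.toStr a).toList
  let rk := solveLoop bs (bs.length - 1) 0 ""
  PySem.Int.toStr (pyDigit (bs.getD 0 ' ') + rk.2) ++ rk.1

-- ===== PORT B =====
-- carry = 1 iff the first digit after the leading one that is ≠ 4 is ≥ 5 (early exit)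
def carryScan : List Int → Int
  | [] => 0
  | d :: rest => if d ≠ 4 then (if d ≥ 5 then 1 else 0) else carryScan rest

def solve_alt (a : Int) : String :=
  let bs := (PySem.Int.toStr a).toList
  let digits := bs.map pyDigit
  PySem.Int.toStr (digits.headD 0 + carryScan digits.tail)
    ++ String.ofList (List.replicate (bs.length - 1) '0')

-- ===== PRECONDITION & SPEC =====
-- Pre_ excludes a < 0: there str(a) starts with '-' and Python A raises ValueError at int('-').
def Pre_solve (a : Int) : Prop := 0 ≤ a
instance (a : Int) : Decidable (Pre_solve a) := by unfold Pre_solve; infer_instance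
def pvWitness_solve : Int := (45)

def Spec_solve (a : Int) (out : String) : Prop := out = solve_alt a
instance (a : Int) (out : String) : Decidable (Spec_solve a out) := by unfold Spec_solve; infer_instance

-- ===== CLAIM (what is proved, stated in full; the proofs are below) =====
def Claim_equal_solve : Prop := ∀ (a : Int), Dom_solve a → Pre_solve a → Spec_solve a (solve a)

-- ===== LEMMAS AND PROOFS =====

-- the carry A's loop has produced after reading positions i, i-1, …, 1 (digits ds, left to right)
def gAux : List Int → Int → Int
  | [], k => k
  | d :: rest, k => if d + gAux rest k ≥ 5 then 1 else 0

theorem gAux_append (xs : List Int) (d k : Int) :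
    gAux (xs ++ [d]) k = gAux xs (if d + k ≥ 5 then 1 else 0) := by
  induction xs with
  | nil => simp [gAux]
  | cons x xs ih => simp [gAux, ih]

theorem gAux_01 (ds : List Int) : gAux ds 0 = 0 ∨ gAux ds 0 = 1 := by
  cases ds with
  | nil => left; rfl
  | cons d rest => unfold gAux; split_ifs <;> simp

theorem gAux_eq_carryScan (ds : List Int) : gAux ds 0 = carryScan ds := by
  induction ds with
  | nil => rfl
  | cons d rest ih =>
    unfold gAux carryScan
    rw [← ih]
    rcases gAux_01 rest with h | h <;> rw [h] <;> split_ifs <;> omega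

theorem solveLoop_eq (bs : List Char) (i : Nat) : ∀ (k : Int) (res : String),
    solveLoop bs i k res =
      (res ++ String.ofList (List.replicate i '0'),
       gAux ((List.range' 1 i).map (fun j => pyDigit (bs.getD j ' '))) k) := by
  induction i with
  | zero =>
    intro k res
    unfold solveLoop
    simp only [ge_iff_le, List.range'_zero, List.map_nil, gAux, List.replicate_zero]
    refine Prod.ext_iff.mpr ⟨?_, rfl⟩
    exact (String.ext (by simp)).symm
  | succ n ih =>
    intro k res
    unfold solveLoop
    rw [if_pos (by omega : n + 1 ≥ 1)]
    simp only [Nat.add_sub_cancel]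
    rw [ih, List.range'_concat]
    have hidx : 1 + 1 * n = n + 1 := by omega
    rw [hidx]
    simp only [List.map_append, List.map_cons, List.map_nil]
    rw [gAux_append]
    refine Prod.ext_iff.mpr ⟨?_, rfl⟩
    apply String.ext
    simp [List.replicate_succ]

theorem map_range'_getD : ∀ (n s : Nat) (l : List Char), s + n = l.length →
    (List.range' s n).map (fun j => pyDigit (l.getD j ' ')) = (l.drop s).map pyDigit := by
  intro n
  induction n with
  | zero =>
    intro s l h
    rw [List.drop_of_length_le (by omega)]
    rfl
  | succ m ih =>
    intro s l h
    have hs : s < l.length := by omega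
    rw [List.range'_succ, List.map_cons, ih (s + 1) l (by omega),
      List.drop_eq_getElem_cons hs, List.map_cons, List.getD_eq_getElem l ' ' hs]

theorem pyDigit_space : pyDigit ' ' = 0 := by decide

theorem solve_eq_alt (a : Int) : solve a = solve_alt a := by
  show (let bs := (PySem.Int.toStr a).toList;
      let rk := solveLoop bs (bs.length - 1) 0 "";
      PySem.Int.toStr (pyDigit (bs.getD 0 ' ') + rk.2) ++ rk.1) =
    (let bs := (PySem.Int.toStr a).toList;
      let digits := bs.map pyDigit;
      PySem.Int.toStr (digits.headD 0 + carryScan digits.tail)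
        ++ String.ofList (List.replicate (bs.length - 1) '0'))
  simp only
  generalize (PySem.Int.toStr a).toList = bs
  rw [solveLoop_eq]
  cases bs with
  | nil =>
    simp only [List.length_nil, Nat.zero_sub, List.range'_zero, List.map_nil, gAux,
      List.getD_nil, pyDigit_space, List.headD_nil, List.tail_nil, carryScan,
      List.replicate_zero]
    congr 1
  | cons c rest =>
    have hlen : (c :: rest).length - 1 = rest.length := by simp
    rw [hlen]
    rw [map_range'_getD rest.length 1 (c :: rest) (by simp [Nat.add_comm])]
    simp only [List.drop_succ_cons, List.drop_zero, List.getD_cons_zero, List.map_cons,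
      List.headD_cons, List.tail_cons]
    rw [gAux_eq_carryScan]
    congr 1

-- ===== VERDICT (by name: the statement is the Claim_ definition above) =====
theorem solve_spec : Claim_equal_solve := by
  intro a _ _
  exact solve_eq_alt a
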